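-- pv_equiv track=rewrite | github.com/Feddakalkun/comfyuifeddafront | backend/server.py | _resolve_chat_model
-- ===== SOURCE A (Python) =====
-- CHAT_MODEL_ALIASES = {
--     "qwen2.5-3b-instruct": ["qwen2.5:3b", "qwen2.5:3b-instruct", "goonsai/qwen2.5-3B-goonsai-nsfw-100k:latest"],
--     "llama-3.2-3b": ["llama3.2:3b", "llama3.2:latest", "dolphin-llama3:latest", "zarigata/unfiltered-llama3:latest"],
-- }
--
-- def _is_vision_model_name(model_name: str) -> bool:
--     lowered = (model_name or "").lower()
--     return any(k in lowered for k in ["vision", "llava", "joycaption", "moondream", "minicpm-v"])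
--
-- def _resolve_chat_model(requested_model: str, available_models: list[str]) -> str:
--     if not available_models:
--         return requested_model
--
--     requested = (requested_model or "").strip()
--     available_lower = {m.lower(): m for m in available_models}
--
--     if requested.lower() in available_lower:
--         return available_lower[requested.lower()]
--
--     if requested and ":" not in requested and f"{requested.lower()}:latest" in available_lower:
--         return available_lower[f"{requested.lower()}:latest"]
--
--     for alias in CHAT_MODEL_ALIASES.get(requested.lower(), []):
--         if alias.lower() in available_lower:
--             return available_lower[alias.lower()]
--
--     non_vision = [m for m in available_models if not _is_vision_model_name(m)]
--     return non_vision[0] if non_vision else available_models[0]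
-- ===== SOURCE B (Python) =====
-- CHAT_MODEL_ALIASES = {
--     "qwen2.5-3b-instruct": ["qwen2.5:3b", "qwen2.5:3b-instruct", "goonsai/qwen2.5-3B-goonsai-nsfw-100k:latest"],
--     "llama-3.2-3b": ["llama3.2:3b", "llama3.2:latest", "dolphin-llama3:latest", "zarigata/unfiltered-llama3:latest"],
-- }
--
-- def _is_vision_model_name(model_name: str) -> bool:
--     lowered = (model_name or "").lower()
--     return any(k in lowered for k in ["vision", "llava", "joycaption", "moondream", "minicpm-v"])
--
-- def _rank(lowered_name, candidates):
--     # index of the first candidate equal to lowered_name, len(candidates) if absent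
--     for i, c in enumerate(candidates):
--         if c == lowered_name:
--             return i
--     return len(candidates)
--
-- def _resolve_chat_model(requested_model: str, available_models: list[str]) -> str:
--     # Single pass over available_models: score each model by the priority rank of
--     # its lowercase name in the candidate list and keep the best-ranked model
--     # (later occurrence wins on ties, matching dict overwriting); track the first
--     # non-vision model for the fallback in the same pass.
--     if not available_models:
--         return requested_model
--     requested = (requested_model or "").strip()
--     req = requested.lower()
--     candidates = [req]
--     if requested and ":" not in requested:
--         candidates.append(req + ":latest")
--     candidates += [a.lower() for a in CHAT_MODEL_ALIASES.get(req, [])]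
--     n = len(candidates)
--     best_rank, best, first_non_vision = n, None, None
--     for m in available_models:
--         r = _rank(m.lower(), candidates)
--         if r <= best_rank and r < n:
--             best_rank, best = r, m
--         if first_non_vision is None and not _is_vision_model_name(m):
--             first_non_vision = m
--     if best is not None:
--         return best
--     if first_non_vision is not None:
--         return first_non_vision
--     return available_models[0]
-- ===== Notes on version B (the rewrite author's own statement) =====
-- stated objective: faster
-- what changed: A resolves by trying three lookup branches (exact, ':latest', aliases) against a case-insensitive dict built from all models; B instead makes a single pass over available_models, scoring each model by the priority rank of its lowercase name in one small candidate list and keeping the best-ranked model (later occurrence wins on ties, matching dict overwrite), tracking the first non-vision fallback in the same pass.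
import Mathlib
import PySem

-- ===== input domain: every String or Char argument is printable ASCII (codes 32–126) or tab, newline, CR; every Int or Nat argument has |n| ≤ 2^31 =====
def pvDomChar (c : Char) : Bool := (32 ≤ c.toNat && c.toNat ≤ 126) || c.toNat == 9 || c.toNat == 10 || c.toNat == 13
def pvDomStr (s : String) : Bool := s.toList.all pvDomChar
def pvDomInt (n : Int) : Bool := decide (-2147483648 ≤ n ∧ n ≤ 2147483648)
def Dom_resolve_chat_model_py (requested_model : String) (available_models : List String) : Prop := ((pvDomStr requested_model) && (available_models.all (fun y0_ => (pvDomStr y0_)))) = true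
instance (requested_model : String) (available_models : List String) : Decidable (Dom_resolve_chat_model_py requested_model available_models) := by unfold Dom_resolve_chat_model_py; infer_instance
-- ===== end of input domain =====

-- B replaces A's dict-and-three-branches lookup by a single pass over available_models that
-- scores each model by the priority rank of its lowercase name in a candidate list and keeps
-- the best-ranked model (last wins on ties), tracking the fallback in the same pass.


-- ===== PORT A =====
def pvAliases : PySem.Dict String (List String) := PySem.Dict.ofList
  [("qwen2.5-3b-instruct", ["qwen2.5:3b", "qwen2.5:3b-instruct", "goonsai/qwen2.5-3B-goonsai-nsfw-100k:latest"]),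
   ("llama-3.2-3b", ["llama3.2:3b", "llama3.2:latest", "dolphin-llama3:latest", "zarigata/unfiltered-llama3:latest"])]

def pvIsVision (model_name : String) : Bool :=
  ["vision", "llava", "joycaption", "moondream", "minicpm-v"].any
    (fun k => PySem.Str.isIn k (PySem.Str.lower model_name))

-- the 'for alias in CHAT_MODEL_ALIASES.get(...)' loop of A
def pvAliasLoop (d : PySem.Dict String String) : List String → Option String
  | [] => none
  | a :: rest =>
    match d.get? (PySem.Str.lower a) with
    | some v => some v
    | none => pvAliasLoop d rest

def resolve_chat_model_py (requested_model : String) (available_models : List String) : String :=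
  match available_models with
  | [] => requested_model
  | m0 :: _ =>
    let requested := PySem.Str.strip requested_model
    let available_lower : PySem.Dict String String :=
      available_models.foldl (fun d m => d.insert (PySem.Str.lower m) m) PySem.Dict.empty
    let rl := PySem.Str.lower requested
    match available_lower.get? rl with
    | some v => v
    | none =>
      match (if !(requested == "") && !(PySem.Str.isIn ":" requested) then
               available_lower.get? (rl ++ ":latest") else none) with
      | some v => v
      | none =>
        match pvAliasLoop available_lower (pvAliases.getD rl []) with
        | some v => v
        | none =>
          match available_models.filter (fun m => !(pvIsVision m)) with
          | nv0 :: _ => nv0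
          | [] => m0

-- ===== PORT B =====
-- Source B's _rank helper: index of the first candidate equal to lowered_name, length if absent
def pvRank (lowered_name : String) : List String → Nat
  | [] => 0
  | c :: cs => if c == lowered_name then 0 else pvRank lowered_name cs + 1

-- the body of Source B's single loop over available_models (state: best_rank, best, first_non_vision)
def pvStep (cands : List String) (st : Nat × Option String × Option String) (m : String) :
    Nat × Option String × Option String :=
  let r := pvRank (PySem.Str.lower m) cands
  let p := if r ≤ st.1 && decide (r < cands.length) then (r, some m) else (st.1, st.2.1)
  let fnv := if st.2.2.isNone && !(pvIsVision m) then some m else st.2.2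
  (p.1, p.2, fnv)

def resolve_chat_model_py_alt (requested_model : String) (available_models : List String) : String :=
  match available_models with
  | [] => requested_model
  | m0 :: _ =>
    let requested := PySem.Str.strip requested_model
    let req := PySem.Str.lower requested
    let cands : List String :=
      [req]
      ++ (if !(requested == "") && !(PySem.Str.isIn ":" requested) then [req ++ ":latest"] else [])
      ++ (pvAliases.getD req []).map PySem.Str.lower
    let st := available_models.foldl (pvStep cands) (cands.length, none, none)
    match st.2.1 with
    | some v => v
    | none =>
      match st.2.2 with
      | some v => v
      | none => m0

-- ===== PRECONDITION & SPEC =====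
def Spec_resolve_chat_model_py (requested_model : String) (available_models : List String) (out : String) : Prop := out = resolve_chat_model_py_alt requested_model available_models
instance (requested_model : String) (available_models : List String) (out : String) : Decidable (Spec_resolve_chat_model_py requested_model available_models out) := by unfold Spec_resolve_chat_model_py; infer_instance

-- ===== CLAIM (what is proved, stated in full; the proofs are below) =====
def Claim_equal_resolve_chat_model_py : Prop := ∀ (requested_model : String) (available_models : List String), Dom_resolve_chat_model_py requested_model available_models → Spec_resolve_chat_model_py requested_model available_models (resolve_chat_model_py requested_model available_models)

-- ===== LEMMAS AND PROOFS =====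

-- the candidate list both proofs are organised around (A tries them in this order)
def pvCandsOf (requested_model : String) : List String :=
  [PySem.Str.lower (PySem.Str.strip requested_model)]
  ++ (if !(PySem.Str.strip requested_model == "") && !(PySem.Str.isIn ":" (PySem.Str.strip requested_model))
      then [PySem.Str.lower (PySem.Str.strip requested_model) ++ ":latest"] else [])
  ++ (pvAliases.getD (PySem.Str.lower (PySem.Str.strip requested_model)) []).map PySem.Str.lower

-- last case-insensitive occurrence of c in avail (what A's dict lookup returns)
def pvFindRev (avail : List String) (c : String) : Option String :=
  avail.reverse.find? (fun m => PySem.Str.lower m == c)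

-- first candidate with a match, resolved to its last occurrence — the common reference form
def pvFirstMatch (avail : List String) : List String → Option String
  | [] => none
  | c :: cs =>
    match pvFindRev avail c with
    | some v => some v
    | none => pvFirstMatch avail cs

def pvRk (cands : List String) (m : String) : Nat := pvRank (PySem.Str.lower m) cands

def pvMrk (cands : List String) : List String → Nat
  | [] => cands.length
  | m :: t => min (pvRk cands m) (pvMrk cands t)

theorem pvRank_le (s : String) (cands : List String) : pvRank s cands ≤ cands.length := by
  induction cands with
  | nil => simp [pvRank]
  | cons c cs ih =>
    simp only [pvRank, List.length_cons]
    split <;> omega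

theorem pvMrk_le (cands l : List String) : pvMrk cands l ≤ cands.length := by
  induction l with
  | nil => simp [pvMrk]
  | cons m t ih =>
    have := pvRank_le (PySem.Str.lower m) cands
    simp only [pvMrk, pvRk]; omega

-- A's dict lookup is the reverse scan: the last insertion wins.
theorem pvGet_eq_findRev (l : List String) (d : PySem.Dict String String) (c : String) :
    (l.foldl (fun d m => d.insert (PySem.Str.lower m) m) d).get? c =
      (pvFindRev l c).or (d.get? c) := by
  induction l generalizing d with
  | nil => simp [pvFindRev]
  | cons m t ih =>
    simp only [List.foldl_cons, ih, pvFindRev, List.reverse_cons, List.find?_append]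
    by_cases h : PySem.Str.lower m = c
    · subst h
      simp [PySem.Dict.get?_insert_self]
    · have hb : (PySem.Str.lower m == c) = false := by simpa using h
      simp [List.find?, hb, PySem.Dict.get?_insert_of_ne _ _ (Ne.symm h)]

theorem pvAliasLoop_eq_firstMatch (avail : List String) (as : List String) :
    pvAliasLoop (avail.foldl (fun d m => d.insert (PySem.Str.lower m) m) PySem.Dict.empty) as =
      pvFirstMatch avail (as.map PySem.Str.lower) := by
  induction as with
  | nil => rfl
  | cons a rest ih =>
    simp only [pvAliasLoop, List.map_cons, pvFirstMatch, pvGet_eq_findRev,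
      PySem.Dict.get?_empty, Option.or_none, ih]

-- A's filter-then-head fallback is a first-match scan
theorem pvFilter_head?_eq_find? (p : String → Bool) (l : List String) :
    (l.filter p).head? = l.find? p := by
  induction l with
  | nil => rfl
  | cons x t ih => by_cases h : p x <;> simp [h, ih]

-- A in the reference form
theorem pvA_form (rm m0 : String) (rest : List String) :
    resolve_chat_model_py rm (m0 :: rest) =
      (match pvFirstMatch (m0 :: rest) (pvCandsOf rm) with
       | some v => v
       | none =>
         match (m0 :: rest).find? (fun m => !(pvIsVision m)) with
         | some v => v
         | none => m0) := by
  unfold resolve_chat_model_py pvCandsOf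
  simp only [pvGet_eq_findRev, PySem.Dict.get?_empty, Option.or_none, pvAliasLoop_eq_firstMatch]
  have hfb :
      (match (m0 :: rest).filter (fun m => !(pvIsVision m)) with
        | nv0 :: _ => nv0
        | [] => m0) =
      (match (m0 :: rest).find? (fun m => !(pvIsVision m)) with
        | some v => v
        | none => m0) := by
    rw [← pvFilter_head?_eq_find?]
    cases (m0 :: rest).filter (fun m => !(pvIsVision m)) <;> rfl
  by_cases h2 : (!(PySem.Str.strip rm == "") &&
      !(PySem.Str.isIn ":" (PySem.Str.strip rm))) = true
  · rw [if_pos h2, if_pos h2]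
    simp only [List.cons_append, List.nil_append, pvFirstMatch]
    cases h1 : pvFindRev (m0 :: rest) (PySem.Str.lower (PySem.Str.strip rm)) with
    | some v => rfl
    | none =>
      cases h3 : pvFindRev (m0 :: rest)
          (PySem.Str.lower (PySem.Str.strip rm) ++ ":latest") with
      | some v => rfl
      | none =>
        cases h4 : pvFirstMatch (m0 :: rest)
            ((pvAliases.getD (PySem.Str.lower (PySem.Str.strip rm)) []).map
              PySem.Str.lower) with
        | some v => rfl
        | none => exact hfb
  · rw [if_neg h2, if_neg h2]
    simp only [List.cons_append, List.nil_append, pvFirstMatch]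
    cases h1 : pvFindRev (m0 :: rest) (PySem.Str.lower (PySem.Str.strip rm)) with
    | some v => rfl
    | none =>
      cases h4 : pvFirstMatch (m0 :: rest)
          ((pvAliases.getD (PySem.Str.lower (PySem.Str.strip rm)) []).map
            PySem.Str.lower) with
      | some v => rfl
      | none => exact hfb

-- find? only looks at members
theorem pvFind?_congr {α : Type} (l : List α) (p q : α → Bool) (h : ∀ x ∈ l, p x = q x) :
    l.find? p = l.find? q := by
  induction l with
  | nil => rfl
  | cons x t ih =>
    have hx := h x (by simp)
    simp only [List.find?, hx]
    split
    · rfl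
    · exact ih (fun y hy => h y (by simp [hy]))

-- if some model matches the head candidate, the minimal rank over (c :: cs) is 0
theorem pvMrk_le_mem (cands : List String) {l : List String} {x : String} (hx : x ∈ l) :
    pvMrk cands l ≤ pvRk cands x := by
  induction l with
  | nil => cases hx
  | cons m t ih =>
    rcases List.mem_cons.mp hx with h | h
    · subst h; simp [pvMrk]
    · have := ih h
      simp only [pvMrk]; omega

theorem pvMrk_zero (c : String) (cs l : List String) (v : String)
    (hv : pvFindRev l c = some v) : pvMrk (c :: cs) l = 0 := by
  unfold pvFindRev at hv
  have hmem : v ∈ l := List.mem_reverse.mp (List.mem_of_find?_eq_some hv)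
  have hp : (PySem.Str.lower v == c) = true := List.find?_eq_some_iff_append.mp hv |>.1
  have hlv : PySem.Str.lower v = c := by simpa using hp
  have h0 : pvRk (c :: cs) v = 0 := by
    simp [pvRk, pvRank, hlv]
  have := pvMrk_le_mem (c :: cs) hmem
  omega

theorem pvMrk_succ (c : String) (cs l : List String)
    (h : ∀ m ∈ l, (PySem.Str.lower m == c) = false) :
    pvMrk (c :: cs) l = pvMrk cs l + 1 := by
  induction l with
  | nil => simp [pvMrk]
  | cons m t ih =>
    have hm := h m (by simp)
    have hc : (c == PySem.Str.lower m) = false := by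
      simp only [beq_eq_false_iff_ne] at hm ⊢; exact fun e => hm e.symm
    simp only [pvMrk, pvRk, pvRank, hc, Bool.false_eq_true, if_false]
    rw [ih (fun y hy => h y (by simp [hy]))]
    omega

-- the minimum rank is attained (needed for last-wins ties)
theorem pvAtt (cands t : List String) (h : pvMrk cands t < cands.length) :
    (t.reverse.find? (fun m => pvRk cands m == pvMrk cands t)).isSome := by
  induction t with
  | nil => simp [pvMrk] at h
  | cons m t' ih =>
    simp only [pvMrk] at h ⊢
    simp only [List.reverse_cons, List.find?_append]
    rcases Nat.le_total (pvMrk cands t') (pvRk cands m) with hle | hle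
    · rw [Nat.min_eq_right hle] at h ⊢
      have := ih h
      cases hf : t'.reverse.find? (fun x => pvRk cands x == pvMrk cands t') <;>
        simp [hf] at this ⊢
    · rw [Nat.min_eq_left hle] at h ⊢
      cases hf : t'.reverse.find? (fun x => pvRk cands x == pvRk cands m) <;>
        simp [List.find?]

-- the first candidate matched is the minimal rank, resolved back-to-front
theorem pvFM (cands l : List String) :
    pvFirstMatch l cands =
      (if pvMrk cands l < cands.length
       then l.reverse.find? (fun m => pvRk cands m == pvMrk cands l) else none) := by
  induction cands generalizing l with
  | nil =>
    have : ¬ pvMrk [] l < List.length ([] : List String) := by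
      simp
    simp [pvFirstMatch]
  | cons c cs ih =>
    simp only [pvFirstMatch]
    cases hv : pvFindRev l c with
    | some v =>
      have hz := pvMrk_zero c cs l v hv
      rw [hz]
      have hlt : 0 < (c :: cs).length := by simp
      rw [if_pos hlt]
      have hpred : (fun m => pvRk (c :: cs) m == 0) = (fun m => PySem.Str.lower m == c) := by
        funext m
        by_cases hm : PySem.Str.lower m = c
        · simp [pvRk, pvRank, hm]
        · have : ¬ (c == PySem.Str.lower m) = true := by
            simp; exact fun e => hm e.symm
          simp only [pvRk, pvRank, if_neg this]
          simp [hm]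
      rw [hpred, ← pvFindRev, hv]
    | none =>
      have hnone : ∀ m ∈ l, (PySem.Str.lower m == c) = false := by
        have h' : ∀ x ∈ l, ¬ PySem.Str.lower x = c := by simpa [pvFindRev] using hv
        intro m hm
        simpa using h' m hm
      have hsucc := pvMrk_succ c cs l hnone
      rw [ih l, hsucc]
      by_cases hlt : pvMrk cs l < cs.length
      · rw [if_pos hlt, if_pos (by simpa [Nat.succ_lt_succ_iff] using hlt)]
        apply pvFind?_congr
        intro x hx
        have hxl : x ∈ l := List.mem_reverse.mp hx
        have hxc := hnone x hxl
        have : pvRk (c :: cs) x = pvRk cs x + 1 := by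
          have hcx : (c == PySem.Str.lower x) = false := by
            simp only [beq_eq_false_iff_ne] at hxc ⊢; exact fun e => hxc e.symm
          simp [pvRk, pvRank, hcx]
        rw [this]
        simp
      · rw [if_neg hlt, if_neg (by simpa [Nat.succ_lt_succ_iff] using hlt)]

-- full characterisation of B's loop from an arbitrary state
theorem pvScan (cands : List String) (l : List String) (br : Nat) (best fnv : Option String)
    (hbr : br ≤ cands.length) :
    l.foldl (pvStep cands) (br, best, fnv) =
      ( min (pvMrk cands l) br,
        (if pvMrk cands l ≤ br ∧ pvMrk cands l < cands.length
         then l.reverse.find? (fun m => pvRk cands m == pvMrk cands l) else best),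
        fnv.or (l.find? (fun m => !(pvIsVision m))) ) := by
  induction l generalizing br best fnv with
  | nil =>
    have h1 : ¬ (pvMrk cands [] ≤ br ∧ pvMrk cands [] < cands.length) := by
      simp [pvMrk]
    simp [pvMrk, Nat.min_eq_right hbr]
  | cons m t ih =>
    simp only [List.foldl_cons]
    have hrk : pvRk cands m ≤ cands.length := pvRank_le (PySem.Str.lower m) cands
    have hmt : pvMrk cands t ≤ cands.length := pvMrk_le cands t
    rw [show pvStep cands (br, best, fnv) m =
        ((if pvRk cands m ≤ br ∧ pvRk cands m < cands.length then pvRk cands m else br),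
         (if pvRk cands m ≤ br ∧ pvRk cands m < cands.length then some m else best),
         (if fnv.isNone && !(pvIsVision m) then some m else fnv)) from by
      by_cases h : pvRk cands m ≤ br ∧ pvRk cands m < cands.length
      · simp only [pvStep, pvRk] at *
        rw [if_pos (by simpa using h), if_pos h, if_pos h]
      · simp only [pvStep, pvRk] at *
        rw [if_neg (by simpa using h), if_neg h, if_neg h]]
    have hfnv : ∀ g : Option String,
        (if fnv.isNone && !(pvIsVision m) then some m else fnv).or
            (t.find? (fun x => !(pvIsVision x))) =
          fnv.or ((m :: t).find? (fun x => !(pvIsVision x))) := by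
      intro g
      cases fnv with
      | some v => simp
      | none => by_cases hv : pvIsVision m <;> simp [List.find?, hv]
    by_cases hm : pvRk cands m ≤ br ∧ pvRk cands m < cands.length
    · simp only [if_pos hm]
      rw [ih _ _ _ (by omega)]
      refine Prod.ext ?_ (Prod.ext ?_ (hfnv none))
      · show min (pvMrk cands t) _ = min (pvMrk cands (m :: t)) br
        simp only [pvMrk]
        omega
      · show (if pvMrk cands t ≤ _ ∧ _ then _ else _) = _
        simp only [pvMrk]
        by_cases ht : pvMrk cands t ≤ pvRk cands m
        · rw [if_pos (by omega), if_pos (by omega)]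
          rw [show min (pvRk cands m) (pvMrk cands t) = pvMrk cands t from by omega]
          simp only [List.reverse_cons, List.find?_append]
          rcases Nat.lt_or_ge (pvMrk cands t) (pvRk cands m) with hlt | hge
          · have hpm : (pvRk cands m == pvMrk cands t) = false := by
              simp only [beq_eq_false_iff_ne]; omega
            simp [List.find?, hpm]
          · have hs := pvAtt cands t (by omega)
            cases hf : t.reverse.find? (fun x => pvRk cands x == pvMrk cands t) with
            | none => rw [hf] at hs; simp at hs
            | some v => simp
        · rw [if_neg (by omega), if_pos (by omega)]
          rw [show min (pvRk cands m) (pvMrk cands t) = pvRk cands m from by omega]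
          simp only [List.reverse_cons, List.find?_append]
          have hnone : t.reverse.find? (fun x => pvRk cands x == pvRk cands m) = none := by
            rw [List.find?_eq_none]
            intro x hx
            have hmem := pvMrk_le_mem cands (List.mem_reverse.mp hx)
            simp only [beq_iff_eq]
            omega
          simp [hnone, List.find?]
    · simp only [if_neg hm]
      rw [ih _ _ _ hbr]
      refine Prod.ext ?_ (Prod.ext ?_ (hfnv none))
      · show min (pvMrk cands t) br = min (pvMrk cands (m :: t)) br
        simp only [pvMrk]
        omega
      · show (if pvMrk cands t ≤ br ∧ _ then _ else _) = _
        simp only [pvMrk]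
        by_cases ht : pvMrk cands t ≤ br ∧ pvMrk cands t < cands.length
        · rw [if_pos ht, if_pos (by omega)]
          rw [show min (pvRk cands m) (pvMrk cands t) = pvMrk cands t from by omega]
          simp only [List.reverse_cons, List.find?_append]
          have hpm : (pvRk cands m == pvMrk cands t) = false := by
            simp only [beq_eq_false_iff_ne]; omega
          simp [List.find?, hpm]
        · rw [if_neg ht, if_neg (by omega)]

-- B in the reference form
theorem pvB_form (rm m0 : String) (rest : List String) :
    resolve_chat_model_py_alt rm (m0 :: rest) =
      (match pvFirstMatch (m0 :: rest) (pvCandsOf rm) with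
       | some v => v
       | none =>
         match (m0 :: rest).find? (fun m => !(pvIsVision m)) with
         | some v => v
         | none => m0) := by
  have hm := pvMrk_le (pvCandsOf rm) (m0 :: rest)
  have key : resolve_chat_model_py_alt rm (m0 :: rest) =
      (match ((m0 :: rest).foldl (pvStep (pvCandsOf rm)) ((pvCandsOf rm).length, none, none)).2.1 with
       | some v => v
       | none =>
         match ((m0 :: rest).foldl (pvStep (pvCandsOf rm)) ((pvCandsOf rm).length, none, none)).2.2 with
         | some v => v
         | none => m0) := rfl
  rw [key, pvScan _ _ _ _ _ (le_refl _), pvFM]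
  by_cases h : pvMrk (pvCandsOf rm) (m0 :: rest) < (pvCandsOf rm).length
  · rw [if_pos ⟨hm, h⟩, if_pos h]
    cases ((m0 :: rest).reverse.find?
        (fun x => pvRk (pvCandsOf rm) x == pvMrk (pvCandsOf rm) (m0 :: rest))) <;> simp
  · rw [if_neg (fun hc => h hc.2), if_neg h]
    simp

-- ===== VERDICT (by name: the statement is the Claim_ definition above) =====
theorem resolve_chat_model_py_spec : Claim_equal_resolve_chat_model_py := by
  intro rm avail _
  unfold Spec_resolve_chat_model_py
  match avail with
  | [] => rfl
  | m0 :: rest => rw [pvA_form, pvB_form]
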